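-- pv_equiv track=rewrite | github.com/CapekM/IT2025 | python_homework/aoc201901.py | calculate_fuel
-- ===== SOURCE A (Python) =====
-- def calculate_fuel(mass: int) -> int:
--     if mass <= 0:
--         return 0
--     else:
--         fuel = mass // 3 - 2
--         if fuel <= 0:
--             return 0
--
--         fuel += calculate_fuel(fuel)
--         return fuel
-- ===== SOURCE B (Python) =====
-- def calculate_fuel(mass: int) -> int:
--     total = 0
--     current = mass // 3 - 2
--     while current > 0:
--         total += current
--         current = current // 3 - 2
--     return total
-- ===== Notes on version B (the rewrite author's own statement) =====
-- stated objective: alternative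
-- what changed: Replaces the recursion (sum threaded through the call stack) with an iterative while loop carrying an explicit accumulator; the non-positive-mass guard is subsumed because the loop body never runs when the first term is not positive.
import Mathlib
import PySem

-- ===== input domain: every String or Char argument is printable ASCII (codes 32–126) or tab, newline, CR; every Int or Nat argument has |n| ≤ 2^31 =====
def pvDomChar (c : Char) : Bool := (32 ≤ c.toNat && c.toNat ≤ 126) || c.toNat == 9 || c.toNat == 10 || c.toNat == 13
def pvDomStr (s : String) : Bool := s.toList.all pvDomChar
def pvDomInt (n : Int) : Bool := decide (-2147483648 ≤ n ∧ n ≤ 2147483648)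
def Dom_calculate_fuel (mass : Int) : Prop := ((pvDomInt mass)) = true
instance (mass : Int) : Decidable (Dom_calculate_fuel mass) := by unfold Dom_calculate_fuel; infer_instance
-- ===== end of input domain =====

-- B replaces A's recursion with an iterative accumulator loop over the same // 3 - 2 step.


-- step decreases: for 0 < m, m // 3 - 2 < m (termination of both ports)
theorem pvStep_lt (m : Int) (h : 0 < m) : PySem.Int.floordiv m 3 - 2 < m := by
  rw [PySem.Int.floordiv_eq_ediv_of_pos (by norm_num)]
  have := Int.ediv_le_self 3 (le_of_lt h)
  omega

-- ===== PORT A =====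
def calculate_fuel (mass : Int) : Int :=
  if mass ≤ 0 then 0
  else
    if PySem.Int.floordiv mass 3 - 2 ≤ 0 then 0
    else (PySem.Int.floordiv mass 3 - 2) + calculate_fuel (PySem.Int.floordiv mass 3 - 2)
termination_by mass.toNat
decreasing_by
  have := pvStep_lt mass (by omega)
  omega

-- ===== PORT B =====
def calculate_fuel_alt_loop (total current : Int) : Int :=
  if current > 0 then
    calculate_fuel_alt_loop (total + current) (PySem.Int.floordiv current 3 - 2)
  else total
termination_by current.toNat
decreasing_by
  have h : current > 0 := by assumption
  have := pvStep_lt current h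
  omega

def calculate_fuel_alt (mass : Int) : Int :=
  calculate_fuel_alt_loop 0 (PySem.Int.floordiv mass 3 - 2)

-- ===== PRECONDITION & SPEC =====
def Spec_calculate_fuel (mass : Int) (out : Int) : Prop := out = calculate_fuel_alt mass
instance (mass : Int) (out : Int) : Decidable (Spec_calculate_fuel mass out) := by unfold Spec_calculate_fuel; infer_instance

-- ===== CLAIM (what is proved, stated in full; the proofs are below) =====
def Claim_equal_calculate_fuel : Prop := ∀ (mass : Int), Dom_calculate_fuel mass → Spec_calculate_fuel mass (calculate_fuel mass)

-- ===== LEMMAS AND PROOFS =====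

-- the loop computes total plus what A's recursion returns from a positive current
theorem loop_eq (total current : Int) :
    calculate_fuel_alt_loop total current =
      total + (if current ≤ 0 then 0 else current + calculate_fuel current) := by
  induction total, current using calculate_fuel_alt_loop.induct with
  | case1 t c hc ih =>
    rw [calculate_fuel_alt_loop, if_pos hc, ih]
    conv_rhs => rw [calculate_fuel]
    have hc' : ¬ c ≤ 0 := by omega
    simp only [if_neg hc']
    split <;> omega
  | case2 t c hc =>
    rw [calculate_fuel_alt_loop, if_neg hc, if_pos (by omega)]
    omega

-- ===== VERDICT (by name: the statement is the Claim_ definition above) =====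
theorem calculate_fuel_spec : Claim_equal_calculate_fuel := by
  intro mass _
  unfold Spec_calculate_fuel calculate_fuel_alt
  rw [loop_eq]
  rw [calculate_fuel]
  by_cases h : mass ≤ 0
  · rw [if_pos h]
    have h3 : PySem.Int.floordiv mass 3 - 2 ≤ 0 := by
      have h1 := PySem.Int.floordiv_eq_ediv_of_pos (a := mass) (b := 3) (by norm_num)
      have h2 : mass / 3 ≤ 0 := by
        have := Int.ediv_le_ediv (a := mass) (b := 0) (c := 3) (by norm_num) h
        simpa using this
      omega
    rw [if_pos h3]; omega
  · rw [if_neg h]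
    split <;> omega
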